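-- pv_equiv track=rewrite | github.com/wingowen/wingo-wiki | check_title_duplicates.py | check_duplicate_titles
-- ===== SOURCE A (Python) =====
-- def check_duplicate_titles(titles):
--     """检查是否存在重复的标题"""
--     duplicates = []
--     title_dict = {}
--
--     for line_num, level, title_text in titles:
--         if title_text in title_dict:
--             # 找到重复的标题
--             prev_line_num, prev_level = title_dict[title_text]
--             duplicates.append((prev_line_num, prev_level, line_num, level, title_text))
--         else:
--             title_dict[title_text] = (line_num, level)
--
--     return duplicates
-- ===== SOURCE B (Python) =====
-- def check_duplicate_titles(titles):
--     """Two-pass: record first occurrence index per title, then scan again and report later occurrences."""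
--     first = {}
--     for idx, (line_num, level, title_text) in enumerate(titles):
--         if title_text not in first:
--             first[title_text] = (idx, line_num, level)
--     duplicates = []
--     for idx, (line_num, level, title_text) in enumerate(titles):
--         fi, fl, fv = first[title_text]
--         if idx != fi:
--             duplicates.append((fl, fv, line_num, level, title_text))
--     return duplicates
-- ===== Notes on version B (the rewrite author's own statement) =====
-- stated objective: alternative
-- what changed: Replaces the single interleaved scan (dict grown and consulted in the same loop) by two passes: one pass builds a map from title to its first occurrence (index, line, level), a second pass emits a duplicate record for every position whose index differs from the stored first index.
import Mathlib
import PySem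

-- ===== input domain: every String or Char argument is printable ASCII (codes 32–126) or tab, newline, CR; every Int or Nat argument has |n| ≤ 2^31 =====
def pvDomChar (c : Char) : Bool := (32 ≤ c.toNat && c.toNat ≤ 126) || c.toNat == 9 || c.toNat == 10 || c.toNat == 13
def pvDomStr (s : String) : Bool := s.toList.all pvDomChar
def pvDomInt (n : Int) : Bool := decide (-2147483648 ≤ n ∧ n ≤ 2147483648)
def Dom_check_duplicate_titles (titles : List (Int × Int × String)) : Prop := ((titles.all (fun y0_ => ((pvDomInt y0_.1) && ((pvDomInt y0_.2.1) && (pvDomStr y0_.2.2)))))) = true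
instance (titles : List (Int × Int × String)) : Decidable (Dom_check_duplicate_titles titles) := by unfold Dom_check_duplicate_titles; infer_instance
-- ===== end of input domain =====

-- B replaces A's single interleaved scan by two passes: a first-occurrence index map, then a
-- linear rescan emitting a record wherever the position differs from the stored first index.


-- ===== PORT A =====
-- single pass: dict title → (line, level) of first sight; later sightings append a record
def check_duplicate_titles (titles : List (Int × Int × String)) : List (Int × Int × Int × Int × String) :=
  (titles.foldl
    (fun (st : List (Int × Int × Int × Int × String) × PySem.Dict String (Int × Int)) p =>
      match st.2.get? p.2.2 with
      | some pv => (st.1 ++ [(pv.1, pv.2, p.1, p.2.1, p.2.2)], st.2)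
      | none => (st.1, st.2.insert p.2.2 (p.1, p.2.1)))
    ([], PySem.Dict.empty)).1

-- ===== PORT B =====
-- pass 1: first occurrence map title → (index, line, level); pass 2: emit where index ≠ first index
def check_duplicate_titles_alt (titles : List (Int × Int × String)) : List (Int × Int × Int × Int × String) :=
  let first := (PySem.List.enumerate titles 0).foldl
    (fun (d : PySem.Dict String (Int × Int × Int)) q =>
      if d.contains q.2.2.2 then d else d.insert q.2.2.2 (q.1, q.2.1, q.2.2.1))
    PySem.Dict.empty
  (PySem.List.enumerate titles 0).foldl
    (fun acc q =>
      match first.get? q.2.2.2 with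
      | some f => if q.1 ≠ f.1 then acc ++ [(f.2.1, f.2.2, q.2.1, q.2.2.1, q.2.2.2)] else acc
      | none => acc)  -- unreachable: pass 1 inserts every title
    []

-- ===== PRECONDITION & SPEC =====
def Spec_check_duplicate_titles (titles : List (Int × Int × String)) (out : List (Int × Int × Int × Int × String)) : Prop := out = check_duplicate_titles_alt titles
instance (titles : List (Int × Int × String)) (out : List (Int × Int × Int × Int × String)) : Decidable (Spec_check_duplicate_titles titles out) := by unfold Spec_check_duplicate_titles; infer_instance

-- ===== CLAIM (what is proved, stated in full; the proofs are below) =====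
def Claim_equal_check_duplicate_titles : Prop := ∀ (titles : List (Int × Int × String)), Dom_check_duplicate_titles titles → Spec_check_duplicate_titles titles (check_duplicate_titles titles)

-- ===== LEMMAS AND PROOFS =====

-- reference recursion: A's loop with the accumulator peeled off
def refLoop (d : PySem.Dict String (Int × Int)) : List (Int × Int × String) → List (Int × Int × Int × Int × String)
  | [] => []
  | p :: rest =>
    match d.get? p.2.2 with
    | some pv => (pv.1, pv.2, p.1, p.2.1, p.2.2) :: refLoop d rest
    | none => refLoop (d.insert p.2.2 (p.1, p.2.1)) rest

theorem a_eq_refLoop (ts : List (Int × Int × String))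
    (d : PySem.Dict String (Int × Int)) (acc : List (Int × Int × Int × Int × String)) :
    (ts.foldl
      (fun (st : List (Int × Int × Int × Int × String) × PySem.Dict String (Int × Int)) p =>
        match st.2.get? p.2.2 with
        | some pv => (st.1 ++ [(pv.1, pv.2, p.1, p.2.1, p.2.2)], st.2)
        | none => (st.1, st.2.insert p.2.2 (p.1, p.2.1)))
      (acc, d)).1 = acc ++ refLoop d ts := by
  induction ts generalizing d acc with
  | nil => simp [refLoop]
  | cons p rest ih =>
    simp only [List.foldl_cons, refLoop]
    cases h : d.get? p.2.2 with
    | some pv => simp [ih]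
    | none => simp [ih]

-- pass-1 map characterised by find?
theorem get?_first (l : List (Int × (Int × Int × String))) (d : PySem.Dict String (Int × Int × Int)) (t : String) :
    (l.foldl
      (fun (d : PySem.Dict String (Int × Int × Int)) q =>
        if d.contains q.2.2.2 then d else d.insert q.2.2.2 (q.1, q.2.1, q.2.2.1)) d).get? t =
    match d.get? t with
    | some v => some v
    | none => (l.find? (fun q => q.2.2.2 == t)).map (fun q => (q.1, q.2.1, q.2.2.1)) := by
  induction l generalizing d with
  | nil => cases h : d.get? t <;> simp [h]
  | cons q rest ih =>
    simp only [List.foldl_cons]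
    by_cases hc : d.contains q.2.2.2 = true
    · rw [if_pos hc, ih]
      cases h : d.get? t with
      | some v => simp
      | none =>
        have hne : (q.2.2.2 == t) = false := by
          rw [beq_eq_false_iff_ne]
          intro he
          rw [he, PySem.Dict.contains_eq_isSome_get?, h] at hc
          simp at hc
        simp [List.find?, hne]
    · rw [if_neg hc, ih]
      by_cases ht : t = q.2.2.2
      · subst ht
        have hd : d.get? q.2.2.2 = none := by
          rw [PySem.Dict.get?_eq_none_iff_contains]
          simpa using hc
        simp [PySem.Dict.get?_insert_self, hd, List.find?]
      · rw [PySem.Dict.get?_insert_of_ne d _ ht]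
        cases h : d.get? t with
        | some v => simp
        | none =>
          have hne : (q.2.2.2 == t) = false := by
            rw [beq_eq_false_iff_ne]
            exact fun he => ht he.symm
          simp [List.find?, hne]

-- invariant for the second pass: one element's relation between A's dict and the first-occurrence map
def DupInv (F : PySem.Dict String (Int × Int × Int)) (d : PySem.Dict String (Int × Int))
    (e : List (Int × (Int × Int × String))) (q : Int × (Int × Int × String)) : Prop :=
  (∀ v, d.get? q.2.2.2 = some v → ∃ j, F.get? q.2.2.2 = some (j, v.1, v.2) ∧ j < q.1) ∧
  (d.get? q.2.2.2 = none →
    F.get? q.2.2.2 = (e.find? (fun p => p.2.2.2 == q.2.2.2)).map (fun p => (p.1, p.2.1, p.2.2.1)))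

theorem b_pass2_eq_refLoop (F : PySem.Dict String (Int × Int × Int))
    (e : List (Int × (Int × Int × String))) (d : PySem.Dict String (Int × Int))
    (acc : List (Int × Int × Int × Int × String))
    (hpw : e.Pairwise (fun a b => a.1 < b.1))
    (hinv : ∀ q ∈ e, DupInv F d e q) :
    e.foldl
      (fun acc q =>
        match F.get? q.2.2.2 with
        | some f => if q.1 ≠ f.1 then acc ++ [(f.2.1, f.2.2, q.2.1, q.2.2.1, q.2.2.2)] else acc
        | none => acc) acc = acc ++ refLoop d (e.map (·.2)) := by
  induction e generalizing d acc with
  | nil => simp [refLoop]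
  | cons q rest ih =>
    have hq := hinv q (by simp)
    simp only [List.foldl_cons, List.map_cons, refLoop]
    cases hd : d.get? q.2.2.2 with
    | some v =>
      obtain ⟨j, hF, hj⟩ := hq.1 v hd
      rw [hF]
      have hne : q.1 ≠ j := by omega
      simp only [hne, ne_eq, not_false_eq_true, if_true]
      rw [ih d (acc ++ [(v.1, v.2, q.2.1, q.2.2.1, q.2.2.2)]) (List.Pairwise.of_cons hpw) ?_]
      · simp
      · intro p hp
        have hip := hinv p (by simp [hp])
        refine ⟨hip.1, fun hdp => ?_⟩
        have hne2 : (q.2.2.2 == p.2.2.2) = false := by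
          rw [beq_eq_false_iff_ne]
          intro he
          rw [← he, hd] at hdp
          exact absurd hdp (by simp)
        have hf : List.find? (fun r => r.2.2.2 == p.2.2.2) (q :: rest) =
            List.find? (fun r => r.2.2.2 == p.2.2.2) rest := by
          simp [List.find?, hne2]
        rw [hip.2 hdp, hf]
    | none =>
      have hq' : F.get? q.2.2.2 = some (q.1, q.2.1, q.2.2.1) := by
        rw [hq.2 hd]
        simp [List.find?]
      rw [hq']
      simp only [ne_eq, not_true_eq_false, if_false]
      rw [ih (d.insert q.2.2.2 (q.2.1, q.2.2.1)) acc (List.Pairwise.of_cons hpw) ?_]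
      intro p hp
      constructor
      · intro w hw
        by_cases he : p.2.2.2 = q.2.2.2
        · rw [he, PySem.Dict.get?_insert_self] at hw
          refine ⟨q.1, ?_, (List.pairwise_cons.mp hpw).1 p hp⟩
          rw [he, hq']
          cases hw
          rfl
        · rw [PySem.Dict.get?_insert_of_ne d _ he] at hw
          exact (hinv p (by simp [hp])).1 w hw
      · intro hdp
        by_cases he : p.2.2.2 = q.2.2.2
        · rw [he, PySem.Dict.get?_insert_self] at hdp
          exact absurd hdp (by simp)
        · rw [PySem.Dict.get?_insert_of_ne d _ he] at hdp
          have hne2 : (q.2.2.2 == p.2.2.2) = false := by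
            rw [beq_eq_false_iff_ne]
            exact fun h2 => he h2.symm
          have hf : List.find? (fun r => r.2.2.2 == p.2.2.2) (q :: rest) =
              List.find? (fun r => r.2.2.2 == p.2.2.2) rest := by
            simp [List.find?, hne2]
          rw [(hinv p (by simp [hp])).2 hdp, hf]

-- ===== VERDICT (by name: the statement is the Claim_ definition above) =====
theorem check_duplicate_titles_spec : Claim_equal_check_duplicate_titles := by
  intro titles _
  unfold Spec_check_duplicate_titles check_duplicate_titles check_duplicate_titles_alt
  rw [a_eq_refLoop]
  rw [b_pass2_eq_refLoop _ _ PySem.Dict.empty []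
    (PySem.List.pairwise_lt_enumerate titles 0) ?_]
  · simp [PySem.List.map_snd_enumerate]
  · intro q _
    constructor
    · intro v hv
      rw [PySem.Dict.get?_empty] at hv
      exact absurd hv (by simp)
    · intro _
      rw [get?_first, PySem.Dict.get?_empty]
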